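-- pv_equiv track=rewrite | github.com/ClanClanClanClan/math-pdf-manager | .archive/legacy/consolidated/filename_checker_monolithic_legacy.py | iterate_nonmath_segments
-- ===== SOURCE A (Python) =====
-- from typing import Any, Iterable, List, Literal, Optional, Sequence, Set, Tuple, Union
--
-- def iterate_nonmath_segments(
--     text: str, regions: List[Tuple[int, int]]
-- ) -> Iterable[Tuple[int, int, str]]:
--     n = len(text)
--     clean = [(max(0, s), min(n, e)) for s, e in regions if s < e]
--     clean.sort()
--     merged = []
--     for s, e in clean:
--         if merged and s <= merged[-1][1]:
--             merged[-1] = (merged[-1][0], max(merged[-1][1], e))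
--         else:
--             merged.append((s, e))
--     last = 0
--     for s, e in merged:
--         if last < s:
--             segment = text[last:s]
--             yield last, s, segment
--         last = e
--     if last < n:
--         segment = text[last:]
--         yield last, n, segment
-- ===== SOURCE B (Python) =====
-- def iterate_nonmath_segments(text, regions):
--     n = len(text)
--     delta = [0] * (n + 1)
--     for s, e in regions:
--         if s < e:
--             lo, hi = max(0, s), min(n, e)
--             if lo < hi:
--                 delta[lo] += 1
--                 delta[hi] -= 1
--     cov = 0
--     start = None
--     for i in range(n):
--         cov += delta[i]
--         if cov > 0:
--             if start is not None:
--                 yield start, i, text[start:i]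
--                 start = None
--         elif start is None:
--             start = i
--     if start is not None:
--         yield start, n, text[start:]
-- ===== Notes on version B (the rewrite author's own statement) =====
-- stated objective: alternative
-- what changed: B drops the clamp/sort/merge-intervals machinery and instead builds a difference array of region coverage, then sweeps the text once with a running prefix sum, emitting maximal uncovered runs.
-- outside the precondition, e.g. on iterate_nonmath_segments('abc', [(5, 7)]): A returns [(0, 5, 'abc')], B returns [(0, 3, 'abc')]; on iterate_nonmath_segments('abc', [(-7, -5)]): A returns [(-5, 3, 'abc')], B returns [(0, 3, 'abc')]
import Mathlib
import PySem

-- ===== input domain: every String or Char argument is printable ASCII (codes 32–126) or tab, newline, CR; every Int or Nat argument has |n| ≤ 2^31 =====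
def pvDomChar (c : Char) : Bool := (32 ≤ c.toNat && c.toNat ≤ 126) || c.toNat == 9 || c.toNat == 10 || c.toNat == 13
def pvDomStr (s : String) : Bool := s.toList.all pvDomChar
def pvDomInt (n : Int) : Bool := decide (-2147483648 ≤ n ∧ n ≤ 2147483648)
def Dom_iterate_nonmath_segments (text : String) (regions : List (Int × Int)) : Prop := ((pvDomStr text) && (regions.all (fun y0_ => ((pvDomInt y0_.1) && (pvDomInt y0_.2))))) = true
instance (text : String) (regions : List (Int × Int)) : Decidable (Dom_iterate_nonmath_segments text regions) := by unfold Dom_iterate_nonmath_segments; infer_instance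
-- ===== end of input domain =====

-- B replaces A's sort-and-merge-intervals pipeline by a difference array of region coverage
-- and one prefix-sum sweep over text positions, emitting maximal uncovered runs.

-- ===== PORT A =====
-- helper: the body of A's merge loop ('if merged and s <= merged[-1][1]: … else: merged.append(…)')
def pvMergeStep (m : List (Int × Int)) (p : Int × Int) : List (Int × Int) :=
  match m.getLast? with
  | some q => if p.1 ≤ q.2 then m.dropLast ++ [(q.1, max q.2 p.2)] else m ++ [p]
  | none => m ++ [p]

-- helper: the body of A's gap loop ('if last < s: yield last, s, text[last:s]'; 'last = e')
def pvGapStep (text : String) (st : Int × List (Int × Int × String)) (p : Int × Int) :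
    Int × List (Int × Int × String) :=
  if st.1 < p.1 then (p.2, st.2 ++ [(st.1, p.1, PySem.Str.slice text (some st.1) (some p.1))])
  else (p.2, st.2)

-- helper: A's trailing 'if last < n: yield last, n, text[last:]'
def pvGapFinish (text : String) (n : Int) (st : Int × List (Int × Int × String)) :
    List (Int × Int × String) :=
  if st.1 < n then st.2 ++ [(st.1, n, PySem.Str.slice text (some st.1) none)] else st.2

def iterate_nonmath_segments (text : String) (regions : List (Int × Int)) :
    List (Int × Int × String) :=
  let n : Int := PySem.Str.len text
  let clean : List (Int × Int) :=
    (regions.filter (fun p => decide (p.1 < p.2))).map (fun p => (max 0 p.1, min n p.2))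
  let clean2 := PySem.List.sorted2 clean (fun p => p.1) (fun p => p.2)
  let merged := clean2.foldl pvMergeStep []
  pvGapFinish text n (merged.foldl (pvGapStep text) ((0 : Int), []))

-- ===== PORT B =====
-- helper: the body of B's difference-array loop over the regions
def pvDeltaStep (n : Int) (d : List Int) (p : Int × Int) : List Int :=
  if p.1 < p.2 then
    let lo := max 0 p.1
    let hi := min n p.2
    if lo < hi then
      let d1 := d.set lo.toNat (d.getD lo.toNat 0 + 1)
      d1.set hi.toNat (d1.getD hi.toNat 0 - 1)
    else d
  else d

-- helper: the body of B's sweep over positions (cov is the running prefix sum)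
def pvSweepStep (text : String) (delta : List Int)
    (st : Int × Option Nat × List (Int × Int × String)) (i : Nat) :
    Int × Option Nat × List (Int × Int × String) :=
  let cov := st.1 + delta.getD i 0
  if 0 < cov then
    match st.2.1 with
    | some s0 => (cov, none, st.2.2 ++ [((s0 : Int), (i : Int), PySem.Str.slice text (some (s0 : Int)) (some (i : Int)))])
    | none => (cov, st.2.1, st.2.2)
  else
    match st.2.1 with
    | none => (cov, some i, st.2.2)
    | some _ => (cov, st.2.1, st.2.2)

-- helper: B's trailing 'if start is not None: yield start, n, text[start:]'
def pvScanFinish (text : String) (n : Nat) (st : Option Nat × List (Int × Int × String)) :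
    List (Int × Int × String) :=
  match st.1 with
  | some s0 => st.2 ++ [((s0 : Int), (n : Int), PySem.Str.slice text (some (s0 : Int)) none)]
  | none => st.2

def iterate_nonmath_segments_alt (text : String) (regions : List (Int × Int)) :
    List (Int × Int × String) :=
  let n : Nat := text.length
  let delta := regions.foldl (pvDeltaStep (n : Int)) (List.replicate (n + 1) 0)
  pvScanFinish text n ((List.range n).foldl (pvSweepStep text delta) (0, none, [])).2

-- ===== PRECONDITION & SPEC =====
-- Pre_ excludes inputs where some region (s,e) with s < e lies entirely outside the text
-- (e < 0 or s > len(text)): A's clamping then yields an inverted interval and A returns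
-- segment tuples whose bounds lie outside the text; B returns the in-text segments there.
def Pre_iterate_nonmath_segments (text : String) (regions : List (Int × Int)) : Prop :=
  ∀ p ∈ regions, p.1 < p.2 → 0 ≤ p.2 ∧ p.1 ≤ (text.length : Int)
instance (text : String) (regions : List (Int × Int)) :
    Decidable (Pre_iterate_nonmath_segments text regions) := by
  unfold Pre_iterate_nonmath_segments; infer_instance

def pvWitness_iterate_nonmath_segments : String × (List (Int × Int)) := ("ab", [(1, 2)])

def Spec_iterate_nonmath_segments (text : String) (regions : List (Int × Int))
    (out : List (Int × Int × String)) : Prop := out = iterate_nonmath_segments_alt text regions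
instance (text : String) (regions : List (Int × Int)) (out : List (Int × Int × String)) :
    Decidable (Spec_iterate_nonmath_segments text regions out) := by
  unfold Spec_iterate_nonmath_segments; infer_instance

-- ===== CLAIM (what is proved, stated in full; the proofs are below) =====
def Claim_equal_iterate_nonmath_segments : Prop := ∀ (text : String) (regions : List (Int × Int)), Dom_iterate_nonmath_segments text regions → Pre_iterate_nonmath_segments text regions → Spec_iterate_nonmath_segments text regions (iterate_nonmath_segments text regions)

-- ===== LEMMAS AND PROOFS =====

-- proof-side model of B's sweep: the same step with the coverage test precomputed as a Bool
def pvScanStep (text : String) (cov : Nat → Bool) (st : Option Nat × List (Int × Int × String))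
    (i : Nat) : Option Nat × List (Int × Int × String) :=
  if cov i then
    match st.1 with
    | some s0 => (none, st.2 ++ [((s0 : Int), (i : Int), PySem.Str.slice text (some (s0 : Int)) (some (i : Int)))])
    | none => st
  else
    match st.1 with
    | none => (some i, st.2)
    | some _ => st

-- prefix sums of the difference array
def pvPref (delta : List Int) (k : Nat) : Int := (delta.take k).sum

-- a "separated chain" of intervals: starts after a, each s ≤ e ≤ n, next interval starts at or after e
def pvSC (n : Int) : Int → List (Int × Int) → Prop
  | _, [] => True
  | a, p :: M => a ≤ p.1 ∧ p.1 ≤ p.2 ∧ p.2 ≤ n ∧ pvSC n p.2 M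

-- degenerate intervals in merged can only sit at 0 or n
def pvDeg (n : Int) (M : List (Int × Int)) : Prop := ∀ p ∈ M, p.1 = p.2 → p.1 = 0 ∨ p.1 = n

-- i is covered by some interval of M
def pvCovM (M : List (Int × Int)) (i : Int) : Prop := ∃ p ∈ M, p.1 ≤ i ∧ i < p.2

lemma pvSC_mem (n : Int) : ∀ (M : List (Int × Int)) (a : Int), pvSC n a M →
    ∀ p ∈ M, a ≤ p.1 ∧ p.1 ≤ p.2 ∧ p.2 ≤ n := by
  intro M
  induction M with
  | nil => intro a _ p hp; cases hp
  | cons q M ih =>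
    intro a h p hp
    obtain ⟨h1, h2, h3, h4⟩ := h
    rcases List.mem_cons.mp hp with hp | hp
    · subst hp; exact ⟨h1, h2, h3⟩
    · have := ih q.2 h4 p hp; exact ⟨by omega, this.2⟩

lemma pvSC_append_last (n : Int) : ∀ (m : List (Int × Int)) (a : Int) (q : Int × Int) (e' : Int),
    pvSC n a (m ++ [q]) → q.1 ≤ e' → e' ≤ n → pvSC n a (m ++ [(q.1, e')]) := by
  intro m
  induction m with
  | nil => intro a q e' h h1 h2; exact ⟨h.1, h1, h2, trivial⟩
  | cons x m ih =>
    intro a q e' h h1 h2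
    exact ⟨h.1, h.2.1, h.2.2.1, ih _ _ _ h.2.2.2 h1 h2⟩

lemma pvSC_append_singleton (n : Int) : ∀ (m : List (Int × Int)) (a : Int) (p : Int × Int),
    pvSC n a m → (m = [] → a ≤ p.1) → (∀ q, m.getLast? = some q → q.2 ≤ p.1) →
    p.1 ≤ p.2 → p.2 ≤ n → pvSC n a (m ++ [p]) := by
  intro m
  induction m with
  | nil => intro a p _ h0 _ h1 h2; exact ⟨h0 rfl, h1, h2, trivial⟩
  | cons x m ih =>
    intro a p h h0 hl h1 h2
    refine ⟨h.1, h.2.1, h.2.2.1, ih _ _ h.2.2.2 ?_ ?_ h1 h2⟩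
    · intro hm; subst hm
      exact hl x rfl
    · intro q hq
      apply hl
      cases m with
      | nil => simp at hq
      | cons y m' => rw [List.getLast?_cons_cons]; exact hq

-- the merge fold of A preserves the separated-chain shape, the degenerate-position fact,
-- and covers exactly the union of what it has seen
lemma pvMergeFold (n : Int) : ∀ (L m : List (Int × Int)),
    L.Pairwise (fun p q => p.1 ≤ q.1) →
    (∀ p ∈ L, 0 ≤ p.1 ∧ p.1 ≤ p.2 ∧ p.2 ≤ n ∧ (p.1 = p.2 → p.1 = 0 ∨ p.1 = n)) →
    pvSC n 0 m → pvDeg n m →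
    (∀ q, m.getLast? = some q → ∀ p ∈ L, q.1 ≤ p.1) →
    pvSC n 0 (L.foldl pvMergeStep m) ∧ pvDeg n (L.foldl pvMergeStep m) ∧
    (∀ i : Int, pvCovM (L.foldl pvMergeStep m) i ↔ pvCovM m i ∨ pvCovM L i) := by
  intro L
  induction L with
  | nil =>
    intro m _ _ hsc hdeg _
    refine ⟨hsc, hdeg, ?_⟩
    intro i; simp [pvCovM]
  | cons x L ih =>
    intro m hpw hprops hsc hdeg hlast
    have hx := hprops x (by simp)
    have hpw' : L.Pairwise (fun p q => p.1 ≤ q.1) := hpw.of_cons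
    have hxle : ∀ p ∈ L, x.1 ≤ p.1 := by
      intro p hp; exact List.rel_of_pairwise_cons hpw hp
    have hprops' : ∀ p ∈ L, 0 ≤ p.1 ∧ p.1 ≤ p.2 ∧ p.2 ≤ n ∧ (p.1 = p.2 → p.1 = 0 ∨ p.1 = n) := by
      intro p hp; exact hprops p (by simp [hp])
    have hstep : ∀ m1 : List (Int × Int), m1 = pvMergeStep m x →
        pvSC n 0 m1 ∧ pvDeg n m1 ∧
        (∀ i : Int, pvCovM m1 i ↔ pvCovM m i ∨ (x.1 ≤ i ∧ i < x.2)) ∧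
        (∀ q, m1.getLast? = some q → ∀ p ∈ L, q.1 ≤ p.1) := by
      intro m1 hm1
      unfold pvMergeStep at hm1
      rcases hq : m.getLast? with _ | q
      · -- m = []
        have hm : m = [] := List.getLast?_eq_none_iff.mp hq
        subst hm
        simp at hm1
        subst hm1
        refine ⟨⟨hx.1, hx.2.1, hx.2.2.1, trivial⟩, ?_, ?_, ?_⟩
        · intro p hp hdg; simp at hp; subst hp; exact hx.2.2.2 hdg
        · intro i; simp [pvCovM]
        · intro q hq2 p hp
          simp at hq2; rw [← hq2]; exact hxle p hp
      · rw [hq] at hm1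
        have hqm : q ∈ m := List.mem_of_getLast? hq
        have hqp := pvSC_mem n m 0 hsc q hqm
        have hsplit : m = m.dropLast ++ [q] := (List.dropLast_append_getLast? q hq).symm
        have hq1x : q.1 ≤ x.1 := hlast q hq x (by simp)
        by_cases hc : x.1 ≤ q.2
        · simp [hc] at hm1
          subst hm1
          have hsc2 : pvSC n 0 (m.dropLast ++ [(q.1, max q.2 x.2)]) := by
            apply pvSC_append_last n m.dropLast 0 q
            · rw [← hsplit]; exact hsc
            · omega
            · have := hx.2.2.1; omega
          refine ⟨hsc2, ?_, ?_, ?_⟩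
          · intro p hp hdg
            rcases List.mem_append.mp hp with hp | hp
            · exact hdeg p (List.dropLast_subset _ hp) hdg
            · simp at hp; subst hp
              simp at hdg
              have : q.1 = q.2 := by omega
              have h0 := hdeg q hqm this
              simpa using h0
          · intro i
            constructor
            · rintro ⟨r, hr, hcov⟩
              rcases List.mem_append.mp hr with hr | hr
              · exact Or.inl ⟨r, List.dropLast_subset _ hr, hcov⟩
              · have hre : r = (q.1, max q.2 x.2) := by simpa using hr
                rw [hre] at hcov
                simp only [] at hcov
                by_cases hiq : i < q.2
                · exact Or.inl ⟨q, hqm, ⟨by simp at hcov; omega, hiq⟩⟩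
                · refine Or.inr ⟨by omega, ?_⟩
                  have := hcov.2; simp at this; omega
            · rintro (⟨r, hr, hcov⟩ | hcov)
              · rw [hsplit] at hr
                rcases List.mem_append.mp hr with hr | hr
                · exact ⟨r, List.mem_append_left _ hr, hcov⟩
                · have hre : r = q := by simpa using hr
                  rw [hre] at hcov
                  refine ⟨(q.1, max q.2 x.2), List.mem_append_right _ (by simp), hcov.1, ?_⟩
                  simp only []
                  have := hcov.2; omega
              · refine ⟨(q.1, max q.2 x.2), List.mem_append_right _ (by simp), by omega, ?_⟩
                simp only []
                have := hcov.2; omega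
          · intro q2 hq2 p hp
            rw [List.getLast?_concat] at hq2
            injection hq2 with hq2
            rw [← hq2]
            exact le_trans hq1x (hxle p hp)
        · simp [hc] at hm1
          subst hm1
          refine ⟨?_, ?_, ?_, ?_⟩
          · apply pvSC_append_singleton n m 0 x hsc
            · intro hm; rw [hm] at hq; simp at hq
            · intro q' hq'; rw [hq] at hq'; injection hq' with h; subst h; omega
            · exact hx.2.1
            · exact hx.2.2.1
          · intro p hp hdg
            rcases List.mem_append.mp hp with hp | hp
            · exact hdeg p hp hdg
            · simp at hp; subst hp; exact hx.2.2.2 hdg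
          · intro i
            constructor
            · rintro ⟨r, hr, hcov⟩
              rcases List.mem_append.mp hr with hr | hr
              · exact Or.inl ⟨r, hr, hcov⟩
              · simp at hr; subst hr; right; exact hcov
            · rintro (⟨r, hr, hcov⟩ | hcov)
              · exact ⟨r, by simp [hr], hcov⟩
              · exact ⟨x, by simp, hcov⟩
          · intro q2 hq2 p hp
            rw [List.getLast?_concat] at hq2
            injection hq2 with hq2
            rw [← hq2]
            exact hxle p hp
    obtain ⟨h1, h2, h3, h4⟩ := hstep (pvMergeStep m x) rfl
    have := ih (pvMergeStep m x) hpw' hprops' h1 h2 h4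
    refine ⟨this.1, this.2.1, ?_⟩
    intro i
    simp only [List.foldl_cons]
    rw [this.2.2 i, h3 i]
    constructor
    · rintro (h | h)
      · rcases h with h | h
        · exact Or.inl h
        · exact Or.inr ⟨x, by simp, h⟩
      · rcases h with ⟨p, hp, hc⟩
        exact Or.inr ⟨p, by simp [hp], hc⟩
    · rintro (h | h)
      · exact Or.inl (Or.inl h)
      · rcases h with ⟨p, hp, hc⟩
        rcases List.mem_cons.mp hp with hp | hp
        · subst hp; exact Or.inl (Or.inr hc)
        · exact Or.inr ⟨p, hp, hc⟩

-- insertion-sort pairwise: the fold of insertBy keeps lists pairwise-ordered by "not lt-after"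
lemma pvInsertBy_pairwise {α : Type} (lt : α → α → Bool)
    (hasym : ∀ a b, lt a b = true → lt b a = false)
    (htr : ∀ a b c, lt a b = true → lt c b = false → lt c a = false) :
    ∀ (ys : List α) (x : α), ys.Pairwise (fun a b => lt b a = false) →
      (PySem.List.insertBy lt x ys).Pairwise (fun a b => lt b a = false) := by
  intro ys
  induction ys with
  | nil => intro x _; simp [PySem.List.insertBy]
  | cons y ys ih =>
    intro x hpw
    have hunf : PySem.List.insertBy lt x (y :: ys) =
        if lt x y then x :: y :: ys else y :: PySem.List.insertBy lt x ys := rfl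
    rw [hunf]
    by_cases hc : lt x y = true
    · rw [if_pos hc]
      refine List.pairwise_cons.mpr ⟨?_, hpw⟩
      intro z hz
      rcases List.mem_cons.mp hz with hz | hz
      · rw [hz]; exact hasym x y hc
      · have hyz := List.rel_of_pairwise_cons hpw hz
        exact htr x y z hc hyz
    · rw [if_neg hc]
      refine List.pairwise_cons.mpr ⟨?_, ih x hpw.of_cons⟩
      intro z hz
      rcases (PySem.List.mem_insertBy lt x z ys).mp hz with hz | hz
      · rw [hz]; simpa using hc
      · exact List.rel_of_pairwise_cons hpw hz

lemma pvFoldInsertBy_pairwise {α : Type} (lt : α → α → Bool)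
    (hasym : ∀ a b, lt a b = true → lt b a = false)
    (htr : ∀ a b c, lt a b = true → lt c b = false → lt c a = false) :
    ∀ (xs acc : List α), acc.Pairwise (fun a b => lt b a = false) →
      (xs.foldl (fun acc x => PySem.List.insertBy lt x acc) acc).Pairwise
        (fun a b => lt b a = false) := by
  intro xs
  induction xs with
  | nil => intro acc h; exact h
  | cons x xs ih =>
    intro acc h
    exact ih _ (pvInsertBy_pairwise lt hasym htr acc x h)

-- the sorted clean list of A is nondecreasing in the interval starts
lemma pvSorted2_starts (xs : List (Int × Int)) :
    (PySem.List.sorted2 xs (fun p => p.1) (fun p => p.2)).Pairwise (fun p q => p.1 ≤ q.1) := by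
  have h := pvFoldInsertBy_pairwise
      (fun a b : Int × Int => decide (a.1 < b.1) || (!decide (b.1 < a.1) && decide (a.2 < b.2)))
      (by intro a b h; simp at h ⊢; omega)
      (by intro a b c h1 h2; simp at h1 h2 ⊢; omega)
      xs [] (by simp)
  have heq : PySem.List.sorted2 xs (fun p => p.1) (fun p => p.2) =
      xs.foldl (fun acc x => PySem.List.insertBy
        (fun a b : Int × Int => decide (a.1 < b.1) || (!decide (b.1 < a.1) && decide (a.2 < b.2)))
        x acc) [] := rfl
  rw [heq]
  refine h.imp ?_
  intro a b hab
  simp at hab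
  omega

-- scan over an all-uncovered stretch of positions: opens (or keeps) a run, emits nothing
lemma pvScanUncov (text : String) (cov : Nat → Bool) :
    ∀ (k i : Nat) (st : Option Nat) (out : List (Int × Int × String)),
      (∀ j, i ≤ j → j < i + k → cov j = false) →
      (List.range' i k).foldl (pvScanStep text cov) (st, out) =
        ((if k = 0 then st else some (st.getD i)), out) := by
  intro k
  induction k with
  | zero => intro i st out _; simp
  | succ k ih =>
    intro i st out h
    rw [List.range'_succ, List.foldl_cons]
    have hci : cov i = false := h i (le_refl i) (by omega)
    have hstep : pvScanStep text cov (st, out) i = (some (st.getD i), out) := by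
      unfold pvScanStep
      simp [hci]
      cases st <;> simp
    rw [hstep, ih (i + 1) _ _ (by intro j h1 h2; exact h j (by omega) (by omega))]
    cases k <;> simp

-- scan over covered positions starting with no open run: nothing happens
lemma pvScanCovNone (text : String) (cov : Nat → Bool) :
    ∀ (k i : Nat) (out : List (Int × Int × String)),
      (∀ j, i ≤ j → j < i + k → cov j = true) →
      (List.range' i k).foldl (pvScanStep text cov) (none, out) = (none, out) := by
  intro k
  induction k with
  | zero => intro i out _; simp
  | succ k ih =>
    intro i out h
    rw [List.range'_succ, List.foldl_cons]
    have hci : cov i = true := h i (le_refl i) (by omega)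
    have hstep : pvScanStep text cov (none, out) i = (none, out) := by
      unfold pvScanStep; simp [hci]
    rw [hstep]
    exact ih (i + 1) _ (by intro j h1 h2; exact h j (by omega) (by omega))

-- scan over a nonempty covered stretch: closes an open run at its first position
lemma pvScanCov (text : String) (cov : Nat → Bool) (k i : Nat) (st : Option Nat)
    (out : List (Int × Int × String)) (hk : 0 < k)
    (h : ∀ j, i ≤ j → j < i + k → cov j = true) :
    (List.range' i k).foldl (pvScanStep text cov) (st, out) =
      (none, out ++ (match st with
        | some t => [((t : Int), (i : Int), PySem.Str.slice text (some (t : Int)) (some (i : Int)))]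
        | none => [])) := by
  obtain ⟨k', rfl⟩ : ∃ k', k = k' + 1 := ⟨k - 1, by omega⟩
  rw [List.range'_succ, List.foldl_cons]
  have hci : cov i = true := h i (le_refl i) (by omega)
  have hstep : pvScanStep text cov (st, out) i = (none, out ++ (match st with
      | some t => [((t : Int), (i : Int), PySem.Str.slice text (some (t : Int)) (some (i : Int)))]
      | none => [])) := by
    unfold pvScanStep
    cases st <;> simp [hci]
  rw [hstep]
  exact pvScanCovNone text cov k' (i + 1) _ (by intro j h1 h2; exact h j (by omega) (by omega))

-- a slice to the very end equals the open-ended slice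
lemma pvSliceLen (text : String) (a : Nat) :
    PySem.Str.slice text (some (a : Int)) (some ((text.length : Nat) : Int)) =
      PySem.Str.slice text (some (a : Int)) none := by
  rw [← String.toList_inj, PySem.Str.toList_slice, PySem.Str.toList_slice,
      PySem.Chars.slice_eq_listSlice, PySem.Chars.slice_eq_listSlice,
      PySem.List.slice_natCast, PySem.List.slice_from_natCast]
  exact List.take_of_length_le (by simp)

-- one more prefix entry adds the next difference-array cell
lemma pvPrefSucc (delta : List Int) (i : Nat) :
    pvPref delta (i + 1) = pvPref delta i + delta.getD i 0 := by
  unfold pvPref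
  rw [List.take_succ, List.sum_append, List.getD_eq_getElem?_getD]
  cases h : delta[i]? <;> simp [h]

-- setting one cell shifts every long-enough prefix sum by the difference
lemma pvPrefSet : ∀ (d : List Int) (j : Nat) (v : Int), j < d.length →
    ∀ k, pvPref (d.set j v) k = pvPref d k + (if j < k then v - d.getD j 0 else 0) := by
  intro d
  induction d with
  | nil => intro j v hj; simp at hj
  | cons x d ih =>
    intro j v hj k
    cases j with
    | zero =>
      cases k with
      | zero => simp [pvPref]
      | succ k => simp [pvPref, List.set_cons_zero]; ring
    | succ j =>
      cases k with
      | zero => simp [pvPref]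
      | succ k =>
        have hj' : j < d.length := by simpa using hj
        have := ih j v hj' k
        simp only [List.set_cons_succ, pvPref, List.take_succ_cons, List.sum_cons,
          List.getD_cons_succ] at this ⊢
        rw [this]
        by_cases hjk : j < k
        · rw [if_pos hjk, if_pos (by omega)]; ring
        · rw [if_neg hjk, if_neg (by omega)]; ring

lemma pvDeltaStepLen (n : Int) (d : List Int) (p : Int × Int) :
    (pvDeltaStep n d p).length = d.length := by
  simp only [pvDeltaStep]
  split_ifs <;> simp

-- what one region contributes to the prefix sum at k
def pvContrib (n : Nat) (r : Int × Int) (k : Nat) : Int :=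
  if r.1 < r.2 ∧ max 0 r.1 < min (n : Int) r.2 then
    (if (max 0 r.1).toNat < k then (1 : Int) else 0) -
      (if (min (n : Int) r.2).toNat < k then (1 : Int) else 0)
  else 0

lemma pvDeltaPref (n : Nat) : ∀ (L : List (Int × Int)) (d : List Int), d.length = n + 1 →
    ∀ k, pvPref (L.foldl (pvDeltaStep (n : Int)) d) k =
      pvPref d k + (L.map (fun r => pvContrib n r k)).sum := by
  intro L
  induction L with
  | nil => intro d _ k; simp
  | cons r L ih =>
    intro d hd k
    rw [List.foldl_cons, List.map_cons, List.sum_cons,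
      ih _ (by rw [pvDeltaStepLen]; exact hd) k]
    have hstep : pvPref (pvDeltaStep (n : Int) d r) k = pvPref d k + pvContrib n r k := by
      unfold pvDeltaStep pvContrib
      by_cases hc1 : r.1 < r.2
      · by_cases hc2 : max 0 r.1 < min (n : Int) r.2
        · rw [if_pos hc1, if_pos hc2, if_pos ⟨hc1, hc2⟩]
          simp only []
          have hlo : (max 0 r.1).toNat < d.length := by rw [hd]; omega
          have hhi : (min (n : Int) r.2).toNat <
              (d.set (max 0 r.1).toNat (d.getD (max 0 r.1).toNat 0 + 1)).length := by
            rw [List.length_set, hd]; omega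
          rw [pvPrefSet _ _ _ hhi k, pvPrefSet _ _ _ hlo k]
          by_cases h1 : (max 0 r.1).toNat < k <;> by_cases h2 : (min (n : Int) r.2).toNat < k <;>
            simp [h1, h2] <;> ring
        · rw [if_pos hc1, if_neg hc2, if_neg (by tauto)]; simp
      · rw [if_neg hc1, if_neg (by tauto)]; simp
    omega

lemma pvSum01 : ∀ (l : List Int), (∀ x ∈ l, x = 0 ∨ x = 1) →
    (0 < l.sum ↔ ∃ x ∈ l, x = 1) := by
  intro l
  induction l with
  | nil => intro _; simp
  | cons x l ih =>
    intro h
    have hx := h x (by simp)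
    have ht := ih (fun y hy => h y (by simp [hy]))
    have hnn : 0 ≤ l.sum := List.sum_nonneg (by intro y hy; rcases h y (by simp [hy]) with h | h <;> omega)
    rw [List.sum_cons]
    constructor
    · intro hpos
      rcases hx with h0 | h1
      · rcases ht.mp (by omega) with ⟨y, hy, hy1⟩
        exact ⟨y, by simp [hy], hy1⟩
      · exact ⟨x, by simp, h1⟩
    · rintro ⟨y, hy, hy1⟩
      rcases List.mem_cons.mp hy with hy | hy
      · omega
      · have := ht.mpr ⟨y, hy, hy1⟩; omega

-- the prefix sum of B's difference array is positive exactly on covered positions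
lemma pvPrefCov (n : Nat) (regions : List (Int × Int)) (j : Nat) (hj : j < n) :
    (0 < pvPref (regions.foldl (pvDeltaStep (n : Int)) (List.replicate (n + 1) 0)) (j + 1)) ↔
      ∃ r ∈ regions, r.1 < r.2 ∧ r.1 ≤ (j : Int) ∧ (j : Int) < r.2 := by
  rw [pvDeltaPref n regions _ (by simp) (j + 1)]
  have h0 : pvPref (List.replicate (n + 1) (0 : Int)) (j + 1) = 0 := by
    simp [pvPref, List.take_replicate]
  rw [h0, zero_add]
  rw [pvSum01 _ (by
    intro x hx
    rcases List.mem_map.mp hx with ⟨r, _, hr⟩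
    rw [← hr]
    unfold pvContrib
    split_ifs <;> omega)]
  constructor
  · rintro ⟨x, hx, hx1⟩
    rcases List.mem_map.mp hx with ⟨r, hr, hre⟩
    rw [← hre] at hx1
    unfold pvContrib at hx1
    refine ⟨r, hr, ?_⟩
    by_cases hc : r.1 < r.2 ∧ max 0 r.1 < min (n : Int) r.2
    · rw [if_pos hc] at hx1
      refine ⟨hc.1, ?_, ?_⟩ <;> [skip; skip] <;>
        · by_cases h1 : (max 0 r.1).toNat < j + 1 <;> by_cases h2 : (min (n : Int) r.2).toNat < j + 1 <;>
            simp [h1, h2] at hx1 <;> omega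
    · rw [if_neg hc] at hx1; omega
  · rintro ⟨r, hr, hlt, h1, h2⟩
    refine ⟨pvContrib n r (j + 1), List.mem_map.mpr ⟨r, hr, rfl⟩, ?_⟩
    unfold pvContrib
    rw [if_pos ⟨hlt, by omega⟩]
    rw [if_pos (by omega), if_neg (by omega)]
    norm_num

-- B's sweep is the Bool-coverage scan, with the running sum made explicit
lemma pvBridge (text : String) (delta : List Int) :
    ∀ (k i : Nat) (st : Option Nat × List (Int × Int × String)),
      (List.range' i k).foldl (pvSweepStep text delta) (pvPref delta i, st) =
        (pvPref delta (i + k),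
          (List.range' i k).foldl
            (pvScanStep text (fun j => decide (0 < pvPref delta (j + 1)))) st) := by
  intro k
  induction k with
  | zero => intro i st; simp
  | succ k ih =>
    intro i st
    rw [List.range'_succ, List.foldl_cons, List.foldl_cons]
    have hstep : pvSweepStep text delta (pvPref delta i, st) i =
        (pvPref delta (i + 1),
          pvScanStep text (fun j => decide (0 < pvPref delta (j + 1))) st i) := by
      obtain ⟨s1, s2⟩ := st
      unfold pvSweepStep pvScanStep
      simp only [← pvPrefSucc]
      by_cases hc : 0 < pvPref delta (i + 1)
      · rw [if_pos hc, if_pos (by simpa using hc)]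
        cases s1 <;> rfl
      · rw [if_neg hc, if_neg (by simpa using hc)]
        cases s1 <;> rfl
    rw [hstep, ih (i + 1)]
    have : i + 1 + k = i + (k + 1) := by omega
    rw [this]

-- the heart of the proof: the gap emission over a separated chain equals the position sweep
lemma pvMain (text : String) (cov : Nat → Bool) :
    ∀ (M : List (Int × Int)) (a : Nat) (out : List (Int × Int × String)),
      a ≤ text.length →
      pvSC (text.length : Int) (a : Int) M →
      pvDeg (text.length : Int) M →
      (∀ i : Nat, a ≤ i → i < text.length → (cov i = true ↔ pvCovM M (i : Int))) →
      pvScanFinish text text.length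
          ((List.range' a (text.length - a)).foldl (pvScanStep text cov) (none, out)) =
        pvGapFinish text (text.length : Int) (M.foldl (pvGapStep text) ((a : Int), out)) := by
  intro M
  induction M with
  | nil =>
    intro a out ha _ _ hcov
    have hunc : ∀ j, a ≤ j → j < a + (text.length - a) → cov j = false := by
      intro j h1 h2
      by_contra hcj
      have hc : cov j = true := by revert hcj; cases cov j <;> simp
      rcases (hcov j h1 (by omega)).mp hc with ⟨p, hp, _⟩
      cases hp
    rw [pvScanUncov text cov (text.length - a) a none out hunc]
    simp only [List.foldl_nil]
    by_cases hlt : a < text.length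
    · rw [if_neg (by omega : ¬ text.length - a = 0)]
      unfold pvScanFinish pvGapFinish
      simp only [Option.getD_none]
      rw [if_pos (by exact_mod_cast hlt)]
    · have h0 : text.length - a = 0 := by omega
      rw [if_pos h0]
      unfold pvScanFinish pvGapFinish
      simp only []
      rw [if_neg (by exact_mod_cast (by omega : ¬ a < text.length))]
  | cons x M ih =>
    intro a out ha hsc hdeg hcov
    obtain ⟨has, hse, hen, hsc'⟩ := hsc
    by_cases hdg : x.1 = x.2
    · rcases hdeg x (by simp) hdg with h0 | hN
      · -- degenerate (0,0) at the front: a no-op on both sides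
        have ha0 : a = 0 := by omega
        have hx2 : x.2 = ((a : Nat) : Int) := by rw [ha0]; push_cast; omega
        have hstep : pvGapStep text ((a : Int), out) x = (((a : Nat) : Int), out) := by
          unfold pvGapStep
          rw [if_neg (by omega)]
          rw [hx2]
        rw [List.foldl_cons, hstep]
        apply ih a out ha (by rw [← hx2]; exact hsc')
          (by intro p hp hd; exact hdeg p (by simp [hp]) hd)
        intro i h1 h2
        rw [hcov i h1 h2]
        constructor
        · rintro ⟨p, hp, hc1, hc2⟩
          rcases List.mem_cons.mp hp with hp | hp
          · rw [hp] at hc1 hc2; omega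
          · exact ⟨p, hp, hc1, hc2⟩
        · rintro ⟨p, hp, hc1, hc2⟩
          exact ⟨p, by simp [hp], hc1, hc2⟩
      · -- degenerate (n,n) at the back: everything that remains is (n,n)
        have hMn : ∀ p ∈ M, p = ((text.length : Int), (text.length : Int)) := by
          intro p hp
          have h2 := pvSC_mem _ M x.2 hsc' p hp
          have : p.1 = (text.length : Int) ∧ p.2 = (text.length : Int) := by omega
          cases p; simp at this ⊢; exact this
        have hunc : ∀ j, a ≤ j → j < a + (text.length - a) → cov j = false := by
          intro j h1 h2
          by_contra hcj
          have hc : cov j = true := by revert hcj; cases cov j <;> simp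
          rcases (hcov j h1 (by omega)).mp hc with ⟨p, hp, hc1, hc2⟩
          rcases List.mem_cons.mp hp with hp | hp
          · rw [hp] at hc1 hc2; omega
          · rw [hMn p hp] at hc1 hc2; simp at hc1 hc2; omega
        have hfold : ∀ (M' : List (Int × Int)) (o : List (Int × Int × String)),
            (∀ p ∈ M', p = ((text.length : Int), (text.length : Int))) →
            M'.foldl (pvGapStep text) ((text.length : Int), o) = ((text.length : Int), o) := by
          intro M'
          induction M' with
          | nil => intro o _; rfl
          | cons y M'' ih2 =>
            intro o hy
            rw [List.foldl_cons]
            have hy1 : y = ((text.length : Int), (text.length : Int)) := hy y (by simp)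
            have hstep : pvGapStep text ((text.length : Int), o) y = ((text.length : Int), o) := by
              unfold pvGapStep
              rw [hy1, if_neg (by simp)]
            rw [hstep]
            exact ih2 o (by intro p hp; exact hy p (by simp [hp]))
        rw [pvScanUncov text cov (text.length - a) a none out hunc]
        rw [List.foldl_cons]
        by_cases hlt : a < text.length
        · rw [if_neg (by omega : ¬ text.length - a = 0)]
          have hstep : pvGapStep text ((a : Int), out) x =
              (x.2, out ++ [((a : Int), x.1, PySem.Str.slice text (some (a : Int)) (some x.1))]) := by
            unfold pvGapStep
            rw [if_pos (by omega)]
          rw [hstep]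
          have hx2n : x.2 = (text.length : Int) := by omega
          have hx1n : x.1 = (text.length : Int) := by omega
          rw [hx2n, hfold M _ hMn]
          unfold pvScanFinish pvGapFinish
          simp only [Option.getD_none]
          rw [if_neg (by omega)]
          rw [hx1n, pvSliceLen]
        · have h0 : text.length - a = 0 := by omega
          rw [if_pos h0]
          have han : (a : Int) = (text.length : Int) := by omega
          have hstep : pvGapStep text ((a : Int), out) x = (x.2, out) := by
            unfold pvGapStep
            rw [if_neg (by omega)]
          rw [hstep, (by omega : x.2 = (text.length : Int)), hfold M _ hMn]
          unfold pvScanFinish pvGapFinish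
          simp only []
          rw [if_neg (by omega)]
    · -- proper interval x.1 < x.2
      have hxlt : x.1 < x.2 := by omega
      have hs0 : (0 : Int) ≤ x.1 := by omega
      have hsx : ((x.1.toNat : Nat) : Int) = x.1 := Int.toNat_of_nonneg hs0
      have hex : ((x.2.toNat : Nat) : Int) = x.2 := Int.toNat_of_nonneg (by omega)
      have haS : a ≤ x.1.toNat := by omega
      have hSE : x.1.toNat ≤ x.2.toNat := by omega
      have hEn : x.2.toNat ≤ text.length := by omega
      have hrange : List.range' a (text.length - a) =
          List.range' a (x.1.toNat - a) ++
            (List.range' x.1.toNat (x.2.toNat - x.1.toNat) ++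
              List.range' x.2.toNat (text.length - x.2.toNat)) := by
        have e0 : text.length - a =
            (x.1.toNat - a) + ((x.2.toNat - x.1.toNat) + (text.length - x.2.toNat)) := by omega
        rw [e0, ← List.range'_append (step := 1)]
        have e2 : a + 1 * (x.1.toNat - a) = x.1.toNat := by omega
        rw [e2, ← List.range'_append (step := 1)]
        have e1 : x.1.toNat + 1 * (x.2.toNat - x.1.toNat) = x.2.toNat := by omega
        rw [e1]
      rw [hrange, List.foldl_append, List.foldl_append]
      have hunc1 : ∀ j, a ≤ j → j < a + (x.1.toNat - a) → cov j = false := by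
        intro j h1 h2
        by_contra hcj
        have hc : cov j = true := by revert hcj; cases cov j <;> simp
        rcases (hcov j h1 (by omega)).mp hc with ⟨p, hp, hc1, hc2⟩
        rcases List.mem_cons.mp hp with hp | hp
        · rw [hp] at hc1; omega
        · have := (pvSC_mem _ M x.2 hsc' p hp).1; omega
      have hcov2 : ∀ j, x.1.toNat ≤ j → j < x.1.toNat + (x.2.toNat - x.1.toNat) → cov j = true := by
        intro j h1 h2
        refine (hcov j (by omega) (by omega)).mpr ⟨x, by simp, by omega, by omega⟩
      rw [pvScanUncov text cov (x.1.toNat - a) a none out hunc1]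
      have hihargs : pvSC (text.length : Int) ((x.2.toNat : Nat) : Int) M := by rw [hex]; exact hsc'
      have hdeg' : pvDeg (text.length : Int) M := by
        intro p hp hd; exact hdeg p (by simp [hp]) hd
      have hcov' : ∀ i : Nat, x.2.toNat ≤ i → i < text.length → (cov i = true ↔ pvCovM M (i : Int)) := by
        intro i h1 h2
        rw [hcov i (by omega) h2]
        constructor
        · rintro ⟨p, hp, hc1, hc2⟩
          rcases List.mem_cons.mp hp with hp | hp
          · rw [hp] at hc2; omega
          · exact ⟨p, hp, hc1, hc2⟩
        · rintro ⟨p, hp, hc1, hc2⟩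
          exact ⟨p, by simp [hp], hc1, hc2⟩
      by_cases haLT : a < x.1.toNat
      · rw [if_neg (by omega : ¬ x.1.toNat - a = 0)]
        simp only [Option.getD_none]
        rw [pvScanCov text cov (x.2.toNat - x.1.toNat) x.1.toNat (some a) out (by omega) hcov2]
        simp only []
        rw [List.foldl_cons]
        have hstep : pvGapStep text ((a : Int), out) x =
            (x.2, out ++ [((a : Int), x.1, PySem.Str.slice text (some (a : Int)) (some x.1))]) := by
          unfold pvGapStep
          rw [if_pos (by omega)]
        rw [hstep]
        have := ih x.2.toNat
          (out ++ [((a : Int), x.1, PySem.Str.slice text (some (a : Int)) (some x.1))])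
          hEn hihargs hdeg' hcov'
        rw [← hsx, ← hex] at this ⊢
        exact this
      · have haEq : a = x.1.toNat := by omega
        rw [if_pos (by omega : x.1.toNat - a = 0)]
        rw [pvScanCov text cov (x.2.toNat - x.1.toNat) x.1.toNat none out (by omega) hcov2]
        simp only [List.append_nil]
        rw [List.foldl_cons]
        have hstep : pvGapStep text ((a : Int), out) x = (x.2, out) := by
          unfold pvGapStep
          rw [if_neg (by omega)]
        rw [hstep]
        have := ih x.2.toNat out hEn hihargs hdeg' hcov'
        rw [← hex] at this ⊢
        exact this

-- membership in A's clamped, sorted list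
lemma pvCleanMem (n : Int) (regions : List (Int × Int)) (p : Int × Int) :
    p ∈ PySem.List.sorted2
        ((regions.filter (fun p => decide (p.1 < p.2))).map
          (fun p => (max 0 p.1, min n p.2)))
        (fun p => p.1) (fun p => p.2) ↔
      ∃ r ∈ regions, r.1 < r.2 ∧ p = (max 0 r.1, min n r.2) := by
  rw [(PySem.List.sorted2_perm _ _ _ _).mem_iff, List.mem_map]
  constructor
  · rintro ⟨r, hr, hre⟩
    have h2 := List.mem_filter.mp hr
    exact ⟨r, h2.1, by simpa using h2.2, hre.symm⟩
  · rintro ⟨r, hr, hlt, hre⟩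
    exact ⟨r, List.mem_filter.mpr ⟨hr, by simpa⟩, hre.symm⟩

-- ===== VERDICT (by name: the statement is the Claim_ definition above) =====
-- A's clamped, sorted interval list: bounds, degeneracy only at 0 or n, from Pre_
lemma pvCleanProps (text : String) (regions : List (Int × Int))
    (hpre : Pre_iterate_nonmath_segments text regions) :
    ∀ p ∈ PySem.List.sorted2
        ((regions.filter (fun p => decide (p.1 < p.2))).map
          (fun p => (max 0 p.1, min (text.length : Int) p.2)))
        (fun p => p.1) (fun p => p.2),
      0 ≤ p.1 ∧ p.1 ≤ p.2 ∧ p.2 ≤ (text.length : Int) ∧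
        (p.1 = p.2 → p.1 = 0 ∨ p.1 = (text.length : Int)) := by
  intro p hp
  rcases (pvCleanMem (text.length : Int) regions p).mp hp with ⟨r, hr, hlt, hre⟩
  have hb := hpre r hr hlt
  rw [hre]
  simp only []
  omega

theorem iterate_nonmath_segments_spec : Claim_equal_iterate_nonmath_segments := by
  intro text regions _hdom hpre
  unfold Spec_iterate_nonmath_segments iterate_nonmath_segments iterate_nonmath_segments_alt
  simp only [PySem.Str.len_eq, String.length_toList]
  have hprops := pvCleanProps text regions hpre
  have hpw := pvSorted2_starts
      ((regions.filter (fun p => decide (p.1 < p.2))).map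
        (fun p => (max 0 p.1, min ((text.length : Nat) : Int) p.2)))
  have hmf := pvMergeFold (text.length : Int) _ []
      hpw hprops trivial (by intro p hp; cases hp) (by intro q hq; simp at hq)
  have hcovm : ∀ i : Nat, (0 : Nat) ≤ i → i < text.length →
      ((fun j => decide (0 < pvPref
          (regions.foldl (pvDeltaStep ((text.length : Nat) : Int))
            (List.replicate (text.length + 1) 0)) (j + 1))) i = true ↔ pvCovM
        ((PySem.List.sorted2
          ((regions.filter (fun p => decide (p.1 < p.2))).map
            (fun p => (max 0 p.1, min ((text.length : Nat) : Int) p.2)))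
          (fun p => p.1) (fun p => p.2)).foldl pvMergeStep []) (i : Int)) := by
    intro i _ hi
    rw [hmf.2.2 (i : Int)]
    have hnotnil : ¬ pvCovM ([] : List (Int × Int)) (i : Int) := by
      rintro ⟨p, hp, _⟩; cases hp
    simp only [decide_eq_true_eq]
    rw [pvPrefCov text.length regions i hi]
    constructor
    · rintro ⟨r, hr, hlt, h1, h2⟩
      refine Or.inr ⟨(max 0 r.1, min ((text.length : Nat) : Int) r.2),
        (pvCleanMem (text.length : Int) regions _).mpr ⟨r, hr, hlt, rfl⟩, ?_, ?_⟩
      · simp only []; omega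
      · simp only []; omega
    · rintro (hc | ⟨p, hp, hc1, hc2⟩)
      · exact absurd hc hnotnil
      · rcases (pvCleanMem (text.length : Int) regions p).mp hp with ⟨r, hr, hlt, hre⟩
        rw [hre] at hc1 hc2
        simp only [] at hc1 hc2
        exact ⟨r, hr, hlt, by omega, by omega⟩
  have hmain := pvMain text
      (fun j => decide (0 < pvPref
        (regions.foldl (pvDeltaStep ((text.length : Nat) : Int))
          (List.replicate (text.length + 1) 0)) (j + 1)))
      _ 0 [] (Nat.zero_le _)
      (by simpa using hmf.1) hmf.2.1 (by intro i h1 h2; exact hcovm i h1 h2)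
  have hb := pvBridge text
      (regions.foldl (pvDeltaStep ((text.length : Nat) : Int))
        (List.replicate (text.length + 1) 0))
      text.length 0 (none, [])
  rw [List.range_eq_range']
  have h00 : ((0 : Int), (none : Option Nat), ([] : List (Int × Int × String))) =
      ((pvPref (regions.foldl (pvDeltaStep ((text.length : Nat) : Int))
          (List.replicate (text.length + 1) 0)) 0, (none, [])) :
        Int × Option Nat × List (Int × Int × String)) := rfl
  rw [h00, hb]
  simp only []
  rw [show (0 : Int) = ((0 : Nat) : Int) by simp]
  rw [← Nat.sub_zero text.length] at hmain ⊢
  exact hmain.symm ▸ rfl
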